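-- pv_equiv track=rewrite | github.com/YAPP-18th/Study_Algorithm_Team_1 | week1/NaLDo627/joystick.py | solution
-- ===== SOURCE A (Python) =====
-- def get_min_movement(target): # 위로 움직이는 것과 아래로 움직이는 것 중 최소 값을 구한다.
--     return min(abs(target - ord('A')), abs(target - (ord('A') + 26)))
--
-- def get_min_offset_and_index(name, idx, checked):
--     right = 0
--     right_idx = -99
--     for i in list(range(idx+1, len(name))) + list(range(idx)): # 현재 인덱스부터 정순으로 순회
--         right += 1
--         if name[i] != 'A' and checked[i] == 0:
--             right_idx = i
--             break
--     else:
--         right = -1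
--
--     left = 0
--     left_idx = -99
--     for i in list(range(idx-1, -1, -1)) + list(range(len(name)-1, idx, -1)): # 현재 인덱스부터 역순으로 순회
--         left += 1
--         if name[i] != 'A' and checked[i] == 0:
--             left_idx = i
--             break
--     else:
--         left = -1
--
--     minimum = min(right, left)
--     minimum_idx = right_idx if minimum == right else left_idx
--     return minimum, minimum_idx
--
-- def solution(name):
--     answer = 0
--     idx = 0
--     # 확인용 임시 배열
--     checked = [0] * len(name)
--
--     while 0 in checked:
--         # 위로 가는 경우 vs 아래로 가는 경우
--         checked[idx] = 1
--         answer += get_min_movement(ord(name[idx]))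
--
--         # 오른쪽으로 가는 경우 vs 왼쪽으로 가는 경우
--         value, new_idx = get_min_offset_and_index(name, idx, checked)
--         if value < 0:
--             break
--
--         answer += value
--         idx = new_idx
--
--     return answer
-- ===== SOURCE B (Python) =====
-- def _bisect_right(a, x):
--     # insertion point after existing entries equal to x, in sorted list a
--     lo, hi = 0, len(a)
--     while lo < hi:
--         mid = (lo + hi) // 2
--         if x < a[mid]:
--             hi = mid
--         else:
--             lo = mid + 1
--     return lo
--
--
-- def _vert(c):
--     o = ord(c)
--     return min(abs(o - 65), abs(o - 91))
--
--
-- def solution(name):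
--     n = len(name)
--     if n == 0:
--         return 0
--     # remaining targets (indices of non-'A' letters other than the start), already sorted
--     rem = [i for i in range(1, n) if name[i] != 'A']
--     answer = _vert(name[0]) + sum(_vert(name[i]) for i in rem)
--     idx = 0
--     while rem:
--         m = len(rem)
--         pos = _bisect_right(rem, idx)
--         jf = pos % m
--         jb = (pos - 1) % m
--         df = (rem[jf] - idx) % n
--         db = (idx - rem[jb]) % n
--         if df <= db:
--             answer += df
--             idx = rem.pop(jf)
--         else:
--             answer += db
--             idx = rem.pop(jb)
--     return answer
-- ===== Notes on version B (the rewrite author's own statement) =====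
-- stated objective: faster
-- what changed: A re-scans the whole string in both circular directions with a checked-array at every greedy step (O(n) per visited target); B precomputes the vertical cost in one pass and keeps the remaining non-'A' indices as a shrinking sorted list, finding the nearest target left/right by hand-written binary search and modular distance, so each step costs O(log n + removal) instead of a full scan.
import Mathlib
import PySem

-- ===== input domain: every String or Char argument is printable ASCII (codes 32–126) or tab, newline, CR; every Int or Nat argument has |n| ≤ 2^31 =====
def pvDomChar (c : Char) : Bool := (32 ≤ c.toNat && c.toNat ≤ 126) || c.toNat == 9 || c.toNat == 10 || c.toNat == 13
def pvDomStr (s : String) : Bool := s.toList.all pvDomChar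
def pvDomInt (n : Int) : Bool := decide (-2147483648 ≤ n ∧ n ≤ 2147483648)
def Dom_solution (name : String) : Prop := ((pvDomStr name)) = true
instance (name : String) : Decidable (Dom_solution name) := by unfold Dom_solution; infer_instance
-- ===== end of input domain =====

-- B replaces A's per-step full circular scans (checked array, O(n) each) by a sorted list of the
-- remaining non-'A' indices queried by binary search; measurably faster. Return values are equal.

-- ===== PORT A =====
-- min(abs(target - ord('A')), abs(target - (ord('A') + 26)))
def get_min_movement (target : Int) : Int := min |target - 65| |target - (65 + 26)|

-- the shared shape of A's two inner 'for … break / else' loops: walk the index list with a counter,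
-- return (counter, index) at the first unchecked non-'A' index, (-1, -99) if none (the for-else path)
def pvScanA (nm : List Char) (checked : List Int) : List Nat → Int → Int × Int
  | [], _ => (-1, -99)
  | i :: rest, c =>
      if nm.getD i 'A' ≠ 'A' ∧ checked.getD i 0 = 0 then (c + 1, (i : Int))
      else pvScanA nm checked rest (c + 1)

-- list(range(idx+1, len(name))) + list(range(idx)) and the reversed ranges, exactly A's traversal
-- orders; indices produced by range are nonnegative, kept as Nat (getD is in range on every call)
def get_min_offset_and_index (nm : List Char) (idx : Nat) (checked : List Int) : Int × Int :=
  let n := nm.length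
  let right := pvScanA nm checked (List.range' (idx + 1) (n - (idx + 1)) ++ List.range' 0 idx) 0
  let left := pvScanA nm checked
      ((List.range idx).reverse ++ (List.range' (idx + 1) (n - (idx + 1))).reverse) 0
  let minimum := min right.1 left.1
  let minimum_idx := if minimum = right.1 then right.2 else left.2
  (minimum, minimum_idx)

-- A's while loop; fuel only makes it total (the loop marks a fresh 0 each pass, so it always
-- terminates within length+1 iterations; fuel never cuts a real run short).  new_idx is a found
-- list index (≥ 0) whenever value ≥ 0, so .toNat changes nothing on the reachable branch.
def pvLoopA (nm : List Char) : Nat → Int → Nat → List Int → Int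
  | 0, answer, _, _ => answer
  | fuel + 1, answer, idx, checked =>
      if (0 : Int) ∈ checked then
        let checked' := checked.set idx 1
        let answer' := answer + get_min_movement ((nm.getD idx 'A').toNat : Int)
        let r := get_min_offset_and_index nm idx checked'
        if r.1 < 0 then answer'
        else pvLoopA nm fuel (answer' + r.1) r.2.toNat checked'
      else answer

def solution (name : String) : Int :=
  let nm := name.toList
  pvLoopA nm (nm.length + 1) 0 0 (List.replicate nm.length 0)

-- ===== PORT B =====
-- hand-written bisect_right of Source B, transliterated
def pvBisectR (a : List Nat) (x : Nat) (lo hi : Nat) : Nat :=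
  if lo < hi then
    let mid := (lo + hi) / 2
    if x < a.getD mid 0 then pvBisectR a x lo mid
    else pvBisectR a x (mid + 1) hi
  else lo
termination_by hi - lo
decreasing_by all_goals omega

def pvVertB (c : Char) : Int := min |(c.toNat : Int) - 65| |(c.toNat : Int) - 91|

-- Source B's while loop: nearest remaining target circularly left/right via bisect + modular distance
def pvLoopB (n : Nat) (rem : List Nat) (answer : Int) (idx : Nat) : Int :=
  if h : rem.length = 0 then answer
  else
    let m := rem.length
    let pos := pvBisectR rem idx 0 m
    let jf := pos % m
    let jb := (PySem.Int.mod ((pos : Int) - 1) (m : Int)).toNat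
    let f := rem.getD jf 0
    let b := rem.getD jb 0
    let df := PySem.Int.mod ((f : Int) - (idx : Int)) (n : Int)
    let db := PySem.Int.mod ((idx : Int) - (b : Int)) (n : Int)
    if df ≤ db then pvLoopB n (rem.eraseIdx jf) (answer + df) f
    else pvLoopB n (rem.eraseIdx jb) (answer + db) b
termination_by rem.length
decreasing_by
  · have hj : jf < rem.length := Nat.mod_lt _ (Nat.pos_of_ne_zero h)
    rw [List.length_eraseIdx_of_lt hj]; omega
  · have hm : (0 : Int) < (m : Int) := by exact_mod_cast Nat.pos_of_ne_zero h
    have h1 : PySem.Int.mod ((pos : Int) - 1) (m : Int) < (m : Int) := PySem.Int.mod_lt _ hm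
    have hj : jb < rem.length := by
      have h0 : (0 : Int) ≤ PySem.Int.mod ((pos : Int) - 1) (m : Int) := PySem.Int.mod_nonneg _ hm
      show (PySem.Int.mod ((pos : Int) - 1) (m : Int)).toNat < m
      omega
    rw [List.length_eraseIdx_of_lt hj]; omega

def solution_alt (name : String) : Int :=
  let nm := name.toList
  let n := nm.length
  if n = 0 then 0
  else
    let rem := (List.range' 1 (n - 1)).filter (fun i => nm.getD i 'A' ≠ 'A')
    let answer := pvVertB (nm.getD 0 'A') + (rem.map (fun i => pvVertB (nm.getD i 'A'))).sum
    pvLoopB n rem answer 0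

-- ===== PRECONDITION & SPEC =====
def Spec_solution (name : String) (out : Int) : Prop := out = solution_alt name
instance (name : String) (out : Int) : Decidable (Spec_solution name out) := by unfold Spec_solution; infer_instance

-- ===== CLAIM (what is proved, stated in full; the proofs are below) =====
def Claim_equal_solution : Prop := ∀ (name : String), Dom_solution name → Spec_solution name (solution name)

-- ===== LEMMAS AND PROOFS =====

-- the Prop behind both inner-loop tests: index i is an unchecked non-'A' position
abbrev pvC (nm : List Char) (ch : List Int) (i : Nat) : Prop :=
  nm.getD i 'A' ≠ 'A' ∧ ch.getD i 0 = 0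

-- the (sorted) list of positions satisfying pvC
def pvA (nm : List Char) (ch : List Int) : List Nat :=
  (List.range nm.length).filter (fun i => decide (pvC nm ch i))

lemma mem_pvA (nm : List Char) (ch : List Int) (e : Nat) :
    e ∈ pvA nm ch ↔ e < nm.length ∧ pvC nm ch e := by
  simp only [pvA, List.mem_filter, List.mem_range, decide_eq_true_eq]

lemma pairwise_pvA (nm : List Char) (ch : List Int) : (pvA nm ch).Pairwise (· < ·) :=
  List.Pairwise.filter _ (List.pairwise_lt_range)

lemma nodup_pvA (nm : List Char) (ch : List Int) : (pvA nm ch).Nodup :=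
  (pairwise_pvA nm ch).imp Nat.ne_of_lt

lemma scan_none (nm : List Char) (ch : List Int) (l : List Nat) (acc : Int)
    (h : ∀ i ∈ l, ¬ pvC nm ch i) : pvScanA nm ch l acc = (-1, -99) := by
  induction l generalizing acc with
  | nil => rfl
  | cons a t ih =>
    have ha := h a (by simp)
    simp only [pvScanA, if_neg ha]
    exact ih (acc + 1) (fun i hi => h i (by simp [hi]))

lemma scan_append_miss (nm : List Char) (ch : List Int) (l1 l2 : List Nat) (acc : Int)
    (h : ∀ i ∈ l1, ¬ pvC nm ch i) :
    pvScanA nm ch (l1 ++ l2) acc = pvScanA nm ch l2 (acc + l1.length) := by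
  induction l1 generalizing acc with
  | nil => simp
  | cons a t ih =>
    have ha := h a (by simp)
    simp only [List.cons_append, pvScanA, if_neg ha]
    rw [ih (acc + 1) (fun i hi => h i (by simp [hi]))]
    congr 1
    push_cast [List.length_cons]; ring

lemma scan_append_hit (nm : List Char) (ch : List Int) (l1 l2 : List Nat) (acc : Int)
    (h : ∃ i ∈ l1, pvC nm ch i) :
    pvScanA nm ch (l1 ++ l2) acc = pvScanA nm ch l1 acc := by
  induction l1 generalizing acc with
  | nil => simp at h
  | cons a t ih =>
    by_cases ha : pvC nm ch a
    · simp only [List.cons_append, pvScanA, if_pos ha]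
    · simp only [List.cons_append, pvScanA, if_neg ha]
      apply ih
      rcases h with ⟨i, hi, hci⟩
      rcases List.mem_cons.mp hi with rfl | hit
      · exact absurd hci ha
      · exact ⟨i, hit, hci⟩

lemma scan_range'_hit (nm : List Char) (ch : List Int) (s len t : Nat) (acc : Int)
    (h1 : s ≤ t) (h2 : t < s + len) (hc : pvC nm ch t)
    (hm : ∀ e, s ≤ e → e < t → ¬ pvC nm ch e) :
    pvScanA nm ch (List.range' s len) acc = (acc + ((t - s : Nat) : Int) + 1, (t : Int)) := by
  induction len generalizing s acc with
  | zero => omega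
  | succ k ih =>
    rw [List.range'_succ]
    by_cases hst : s = t
    · subst hst
      simp only [pvScanA, if_pos hc]
      simp
    · have hns := hm s le_rfl (by omega)
      simp only [pvScanA, if_neg hns]
      rw [ih (s + 1) (acc + 1) (by omega) (by omega) (fun e he1 he2 => hm e (by omega) he2)]
      have hts : (t - s : Nat) = (t - (s + 1) : Nat) + 1 := by omega
      rw [hts]
      congr 1
      push_cast; ring

lemma scan_rev_range_hit (nm : List Char) (ch : List Int) (k t : Nat) (acc : Int)
    (h1 : t < k) (hc : pvC nm ch t)
    (hm : ∀ e, t < e → e < k → ¬ pvC nm ch e) :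
    pvScanA nm ch (List.range k).reverse acc = (acc + ((k - 1 - t : Nat) : Int) + 1, (t : Int)) := by
  induction k generalizing acc with
  | zero => omega
  | succ k ih =>
    rw [List.range_succ, List.reverse_append]
    simp only [List.reverse_singleton, List.singleton_append]
    by_cases htk : t = k
    · subst htk
      simp only [pvScanA, if_pos hc]
      simp
    · have hnk := hm k (by omega) (by omega)
      simp only [pvScanA, if_neg hnk]
      rw [ih (acc + 1) (by omega) (fun e he1 he2 => hm e he1 (by omega))]
      have hts : (k + 1 - 1 - t : Nat) = (k - 1 - t : Nat) + 1 := by omega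
      rw [hts]
      congr 1
      push_cast; ring

lemma scan_rev_range'_hit (nm : List Char) (ch : List Int) (s len t : Nat) (acc : Int)
    (h1 : s ≤ t) (h2 : t < s + len) (hc : pvC nm ch t)
    (hm : ∀ e, t < e → e < s + len → ¬ pvC nm ch e) :
    pvScanA nm ch (List.range' s len).reverse acc
      = (acc + ((s + len - 1 - t : Nat) : Int) + 1, (t : Int)) := by
  induction len generalizing acc with
  | zero => omega
  | succ k ih =>
    rw [List.range'_1_concat, List.reverse_append]
    simp only [List.reverse_singleton, List.singleton_append]
    by_cases htk : t = s + k
    · subst htk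
      simp only [pvScanA, if_pos hc]
      simp
    · have hnk := hm (s + k) (by omega) (by omega)
      simp only [pvScanA, if_neg hnk]
      rw [ih (acc + 1) (by omega) (fun e he1 he2 => hm e he1 (by omega))]
      have hts : (s + (k + 1) - 1 - t : Nat) = (s + k - 1 - t : Nat) + 1 := by omega
      rw [hts]
      congr 1
      push_cast; ring

lemma sorted_getD_le (a : List Nat) (ha : a.Pairwise (· < ·)) (i j : Nat)
    (hij : i ≤ j) (hj : j < a.length) : a.getD i 0 ≤ a.getD j 0 := by
  rcases Nat.eq_or_lt_of_le hij with rfl | h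
  · exact le_refl _
  · have := (List.pairwise_iff_getElem.mp ha) i j (by omega) hj h
    rw [List.getD_eq_getElem a 0 (by omega), List.getD_eq_getElem a 0 hj]
    omega

lemma bisect_spec (a : List Nat) (x : Nat) (ha : a.Pairwise (· < ·)) :
    ∀ (d lo hi : Nat), hi - lo = d → lo ≤ hi → hi ≤ a.length →
    (∀ i, i < lo → a.getD i 0 ≤ x) →
    (∀ i, hi ≤ i → i < a.length → x < a.getD i 0) →
    (∀ i, i < pvBisectR a x lo hi → a.getD i 0 ≤ x) ∧
    (∀ i, pvBisectR a x lo hi ≤ i → i < a.length → x < a.getD i 0) ∧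
    pvBisectR a x lo hi ≤ a.length := by
  intro d
  induction d using Nat.strong_induction_on with
  | _ d ih =>
    intro lo hi hd hlh hha hlo hhi
    rw [pvBisectR]
    by_cases hlt : lo < hi
    · simp only [if_pos hlt]
      by_cases hx : x < a.getD ((lo + hi) / 2) 0
      · simp only [if_pos hx]
        exact ih ((lo + hi) / 2 - lo) (by omega) lo ((lo + hi) / 2) rfl (by omega) (by omega)
          hlo (fun i hi1 hi2 => lt_of_lt_of_le hx (sorted_getD_le a ha _ i hi1 hi2))
      · simp only [if_neg hx]
        have hx' : a.getD ((lo + hi) / 2) 0 ≤ x := Nat.le_of_not_lt hx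
        exact ih (hi - ((lo + hi) / 2 + 1)) (by omega) ((lo + hi) / 2 + 1) hi rfl (by omega) hha
          (fun i hi1 => le_trans (sorted_getD_le a ha i ((lo + hi) / 2) (by omega) (by omega)) hx')
          hhi
    · simp only [if_neg hlt]
      have : lo = hi := by omega
      subst this
      exact ⟨hlo, hhi, le_trans hlh hha⟩


-- A's forward scan finds exactly B's bisect-selected forward-nearest target, at B's modular distance
lemma scanR_char (nm : List Char) (ch : List Int) (idx : Nat) (a : List Nat) (pos jf f : Nat)
    (hmem : ∀ e, e ∈ a ↔ e < nm.length ∧ pvC nm ch e)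
    (hsort : a.Pairwise (· < ·))
    (hpos : pos = pvBisectR a idx 0 a.length)
    (hjf : jf = pos % a.length) (hf : f = a.getD jf 0)
    (hidx : idx < nm.length) (hcidx : ¬ pvC nm ch idx) (hne : a ≠ []) :
    pvScanA nm ch (List.range' (idx + 1) (nm.length - (idx + 1)) ++ List.range' 0 idx) 0
      = (PySem.Int.mod ((f : Int) - (idx : Int)) (nm.length : Int), (f : Int))
    ∧ 1 ≤ PySem.Int.mod ((f : Int) - (idx : Int)) (nm.length : Int)
    ∧ f ∈ a := by
  have hmpos : 0 < a.length := List.length_pos_iff.mpr hne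
  have hnpos : (0 : Int) < (nm.length : Int) := by exact_mod_cast Nat.zero_lt_of_lt hidx
  have hgm : ∀ j, j < a.length → a.getD j 0 ∈ a := fun j hj => by
    rw [List.getD_eq_getElem _ _ hj]; exact List.getElem_mem hj
  have hinv : ∀ e, e ∈ a → ∃ i, i < a.length ∧ a.getD i 0 = e := fun e he => by
    obtain ⟨i, hi, hie⟩ := List.getElem_of_mem he
    exact ⟨i, hi, by rw [List.getD_eq_getElem _ _ hi, hie]⟩
  obtain ⟨P1, P2, Ple⟩ := bisect_spec a idx hsort a.length 0 a.length (by omega) (by omega)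
      le_rfl (fun i hi => absurd hi (Nat.not_lt_zero i)) (fun i h1 h2 => absurd h1 (by omega))
  rw [← hpos] at P1 P2 Ple
  rcases Nat.lt_or_ge pos a.length with hp | hp
  · -- some target lies strictly right of idx (no wraparound)
    have hjf' : jf = pos := by rw [hjf, Nat.mod_eq_of_lt hp]
    have hf' : f = a.getD pos 0 := by rw [hf, hjf']
    have hfm : f ∈ a := hf' ▸ hgm pos hp
    have hfn : f < nm.length := ((hmem f).mp hfm).1
    have hCf : pvC nm ch f := ((hmem f).mp hfm).2
    have hfgt : idx < f := by rw [hf']; exact P2 pos le_rfl hp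
    have hmiss : ∀ e, idx + 1 ≤ e → e < f → ¬ pvC nm ch e := by
      intro e he1 he2 hce
      obtain ⟨i, hi, hie⟩ := hinv e ((hmem e).mpr ⟨by omega, hce⟩)
      rcases Nat.lt_or_ge i pos with hip | hip
      · have := P1 i hip; omega
      · have := sorted_getD_le a hsort pos i hip hi
        rw [← hf'] at this; omega
    rw [scan_append_hit nm ch _ _ 0 ⟨f, by rw [List.mem_range'_1]; omega, hCf⟩]
    rw [scan_range'_hit nm ch (idx + 1) (nm.length - (idx + 1)) f 0 (by omega) (by omega) hCf hmiss]
    have hmod : PySem.Int.mod ((f : Int) - (idx : Int)) (nm.length : Int)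
        = (f : Int) - (idx : Int) := by
      rw [PySem.Int.mod_eq_emod_of_pos hnpos]
      exact Int.emod_eq_of_lt (by omega) (by omega)
    rw [hmod]
    refine ⟨?_, by omega, hfm⟩
    simp only [Prod.mk.injEq]
    constructor
    · omega
    · trivial
  · -- every target is at or left of idx: wrap to the smallest one
    have hpm : pos = a.length := by omega
    have hjf' : jf = 0 := by rw [hjf, hpm, Nat.mod_self]
    have hf' : f = a.getD 0 0 := by rw [hf, hjf']
    have hfm : f ∈ a := hf' ▸ hgm 0 hmpos
    have hfn : f < nm.length := ((hmem f).mp hfm).1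
    have hCf : pvC nm ch f := ((hmem f).mp hfm).2
    have hfle : f ≤ idx := by
      have := P1 0 (by omega); rw [← hf'] at this; exact this
    have hflt : f < idx := by
      rcases Nat.lt_or_ge f idx with h | h
      · exact h
      · have : f = idx := by omega
        exact absurd (this ▸ hCf) hcidx
    have hmiss1 : ∀ i ∈ List.range' (idx + 1) (nm.length - (idx + 1)), ¬ pvC nm ch i := by
      intro e he hce
      rw [List.mem_range'_1] at he
      obtain ⟨i, hi, hie⟩ := hinv e ((hmem e).mpr ⟨by omega, hce⟩)
      have := P1 i (by omega); omega
    have hmiss2 : ∀ e, 0 ≤ e → e < f → ¬ pvC nm ch e := by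
      intro e _ he2 hce
      obtain ⟨i, hi, hie⟩ := hinv e ((hmem e).mpr ⟨by omega, hce⟩)
      have := sorted_getD_le a hsort 0 i (Nat.zero_le i) hi
      rw [← hf'] at this; omega
    rw [scan_append_miss nm ch _ _ 0 hmiss1]
    rw [scan_range'_hit nm ch 0 idx f _ (Nat.zero_le f) (by omega) hCf hmiss2]
    have hmod : PySem.Int.mod ((f : Int) - (idx : Int)) (nm.length : Int)
        = (f : Int) - (idx : Int) + (nm.length : Int) := by
      rw [PySem.Int.mod_eq_emod_of_pos hnpos]
      rw [← Int.add_mul_emod_self_left (a := (f : Int) - (idx : Int))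
        (b := (nm.length : Int)) (c := 1), mul_one]
      exact Int.emod_eq_of_lt (by omega) (by omega)
    rw [hmod]
    refine ⟨?_, by omega, hfm⟩
    simp only [Prod.mk.injEq, List.length_range']
    constructor
    · omega
    · trivial

-- A's backward scan finds exactly B's bisect-selected backward-nearest target, at B's modular distance
lemma scanL_char (nm : List Char) (ch : List Int) (idx : Nat) (a : List Nat) (pos jb b : Nat)
    (hmem : ∀ e, e ∈ a ↔ e < nm.length ∧ pvC nm ch e)
    (hsort : a.Pairwise (· < ·))
    (hpos : pos = pvBisectR a idx 0 a.length)
    (hjb : jb = (PySem.Int.mod ((pos : Int) - 1) (a.length : Int)).toNat)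
    (hb : b = a.getD jb 0)
    (hidx : idx < nm.length) (hcidx : ¬ pvC nm ch idx) (hne : a ≠ []) :
    pvScanA nm ch ((List.range idx).reverse
        ++ (List.range' (idx + 1) (nm.length - (idx + 1))).reverse) 0
      = (PySem.Int.mod ((idx : Int) - (b : Int)) (nm.length : Int), (b : Int))
    ∧ 1 ≤ PySem.Int.mod ((idx : Int) - (b : Int)) (nm.length : Int)
    ∧ b ∈ a := by
  have hmpos : 0 < a.length := List.length_pos_iff.mpr hne
  have hmposi : (0 : Int) < (a.length : Int) := by exact_mod_cast hmpos
  have hnpos : (0 : Int) < (nm.length : Int) := by exact_mod_cast Nat.zero_lt_of_lt hidx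
  have hgm : ∀ j, j < a.length → a.getD j 0 ∈ a := fun j hj => by
    rw [List.getD_eq_getElem _ _ hj]; exact List.getElem_mem hj
  have hinv : ∀ e, e ∈ a → ∃ i, i < a.length ∧ a.getD i 0 = e := fun e he => by
    obtain ⟨i, hi, hie⟩ := List.getElem_of_mem he
    exact ⟨i, hi, by rw [List.getD_eq_getElem _ _ hi, hie]⟩
  obtain ⟨P1, P2, Ple⟩ := bisect_spec a idx hsort a.length 0 a.length (by omega) (by omega)
      le_rfl (fun i hi => absurd hi (Nat.not_lt_zero i)) (fun i h1 h2 => absurd h1 (by omega))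
  rw [← hpos] at P1 P2 Ple
  rcases Nat.eq_zero_or_pos pos with hp0 | hp0
  · -- no target at or left of idx: wrap to the largest one
    have hjb' : jb = a.length - 1 := by
      have hv : (-1 : Int) % (a.length : Int) = (a.length : Int) - 1 := by
        rw [← Int.add_mul_emod_self_left (a := (-1 : Int)) (b := (a.length : Int)) (c := 1),
          mul_one]
        exact Int.emod_eq_of_lt (by omega) (by omega)
      rw [hjb, hp0, PySem.Int.mod_eq_emod_of_pos hmposi]
      push_cast
      rw [hv]
      omega
    have hjlt : jb < a.length := by omega
    have hbm : b ∈ a := hb ▸ hgm jb hjlt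
    have hbn : b < nm.length := ((hmem b).mp hbm).1
    have hCb : pvC nm ch b := ((hmem b).mp hbm).2
    have hbgt : idx < b := by
      rw [hb]; exact P2 jb (by omega) hjlt
    have hmiss1 : ∀ i ∈ (List.range idx).reverse, ¬ pvC nm ch i := by
      intro e he hce
      rw [List.mem_reverse, List.mem_range] at he
      obtain ⟨i, hi, hie⟩ := hinv e ((hmem e).mpr ⟨by omega, hce⟩)
      have := P2 i (by omega) hi; omega
    have hmiss2 : ∀ e, b < e → e < (idx + 1) + (nm.length - (idx + 1)) → ¬ pvC nm ch e := by
      intro e he1 he2 hce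
      obtain ⟨i, hi, hie⟩ := hinv e ((hmem e).mpr ⟨by omega, hce⟩)
      have := sorted_getD_le a hsort i (a.length - 1) (by omega) (by omega)
      rw [← hjb', ← hb] at this; omega
    rw [scan_append_miss nm ch _ _ 0 hmiss1]
    rw [scan_rev_range'_hit nm ch (idx + 1) (nm.length - (idx + 1)) b _ (by omega) (by omega)
      hCb hmiss2]
    have hmod : PySem.Int.mod ((idx : Int) - (b : Int)) (nm.length : Int)
        = (idx : Int) - (b : Int) + (nm.length : Int) := by
      rw [PySem.Int.mod_eq_emod_of_pos hnpos]
      rw [← Int.add_mul_emod_self_left (a := (idx : Int) - (b : Int))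
        (b := (nm.length : Int)) (c := 1), mul_one]
      exact Int.emod_eq_of_lt (by omega) (by omega)
    rw [hmod]
    refine ⟨?_, by omega, hbm⟩
    simp only [Prod.mk.injEq, List.length_reverse, List.length_range]
    constructor
    · omega
    · trivial
  · -- some target lies at or left of idx (strictly left, as idx itself is checked)
    have hjb' : jb = pos - 1 := by
      rw [hjb, PySem.Int.mod_eq_emod_of_pos hmposi,
        Int.emod_eq_of_lt (by omega) (by omega)]
      omega
    have hjlt : jb < a.length := by omega
    have hbm : b ∈ a := hb ▸ hgm jb hjlt
    have hbn : b < nm.length := ((hmem b).mp hbm).1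
    have hCb : pvC nm ch b := ((hmem b).mp hbm).2
    have hble : b ≤ idx := by
      have := P1 (pos - 1) (by omega); rw [← hjb', ← hb] at this; exact this
    have hblt : b < idx := by
      rcases Nat.lt_or_ge b idx with h | h
      · exact h
      · have : b = idx := by omega
        exact absurd (this ▸ hCb) hcidx
    have hmiss : ∀ e, b < e → e < idx → ¬ pvC nm ch e := by
      intro e he1 he2 hce
      obtain ⟨i, hi, hie⟩ := hinv e ((hmem e).mpr ⟨by omega, hce⟩)
      rcases Nat.lt_or_ge i pos with hip | hip
      · have := sorted_getD_le a hsort i (pos - 1) (by omega) (by omega)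
        rw [← hjb', ← hb] at this; omega
      · have := P2 i hip hi; omega
    rw [scan_append_hit nm ch _ _ 0 ⟨b, by rw [List.mem_reverse, List.mem_range]; omega, hCb⟩]
    rw [scan_rev_range_hit nm ch idx b 0 hblt hCb hmiss]
    have hmod : PySem.Int.mod ((idx : Int) - (b : Int)) (nm.length : Int)
        = (idx : Int) - (b : Int) := by
      rw [PySem.Int.mod_eq_emod_of_pos hnpos]
      exact Int.emod_eq_of_lt (by omega) (by omega)
    rw [hmod]
    refine ⟨?_, by omega, hbm⟩
    simp only [Prod.mk.injEq]
    constructor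
    · omega
    · trivial


lemma vert_eq (c : Char) : get_min_movement ((c.toNat : Int)) = pvVertB c := by
  norm_num [get_min_movement, pvVertB]

-- marking position c0 as checked removes exactly c0 from the candidate list
lemma pvA_set (nm : List Char) (ch : List Int) (hlen : ch.length = nm.length)
    (c0 : Nat) (hc : c0 < nm.length) :
    pvA nm (ch.set c0 1) = (pvA nm ch).filter (fun i => decide (i ≠ c0)) := by
  unfold pvA
  rw [List.filter_filter]
  apply List.filter_congr
  intro i hi
  rw [List.mem_range] at hi
  by_cases hic : i = c0
  · subst hic
    have h1 : (ch.set i 1)[i]? = some 1 := by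
      rw [List.getElem?_eq_getElem (by rw [List.length_set, hlen]; exact hc)]
      simp
    simp [pvC, List.getD, h1]
  · have h1 : (ch.set c0 1)[i]? = ch[i]? := List.getElem?_set_ne (fun he => hic he.symm)
    simp [pvC, List.getD, h1, hic]

lemma filter_ne_eq_eraseIdx (a : List Nat) (hn : a.Nodup) (j : Nat) (hj : j < a.length) :
    a.filter (fun i => decide (i ≠ a.getD j 0)) = a.eraseIdx j := by
  have h2 : a.erase (a.getD j 0) = a.eraseIdx j := by
    rw [List.getD_eq_getElem _ _ hj]
    exact List.Nodup.erase_getElem hn j hj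
  rw [← h2]
  rw [List.Nodup.erase_eq_filter hn]
  apply List.filter_congr
  intro i _
  rw [Bool.eq_iff_iff]
  simp [bne]

lemma sum_split_eraseIdx (a : List Nat) (hn : a.Nodup) (v : Nat → Int) (j : Nat)
    (hj : j < a.length) :
    (a.map v).sum = v (a.getD j 0) + (((a.eraseIdx j).map v).sum) := by
  have hmem : a.getD j 0 ∈ a := by
    rw [List.getD_eq_getElem _ _ hj]; exact List.getElem_mem hj
  have hperm := List.perm_cons_erase hmem
  have h2 : a.erase (a.getD j 0) = a.eraseIdx j := by
    rw [List.getD_eq_getElem _ _ hj]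
    exact List.Nodup.erase_getElem hn j hj
  calc (a.map v).sum = ((a.getD j 0 :: a.erase (a.getD j 0)).map v).sum := (hperm.map v).sum_eq
    _ = v (a.getD j 0) + ((a.eraseIdx j).map v).sum := by rw [h2]; simp

-- the loop invariant: A's loop state (answer, idx, checked) corresponds to B's
-- (precomputed total vertical cost + horizontals so far, idx, remaining-target list)
lemma pv_main (nm : List Char) :
    ∀ (fuel : Nat) (ch : List Int) (idx : Nat) (ansA : Int),
      ch.length = nm.length → idx < nm.length → ch.getD idx 0 = 0 →
      (pvA nm (ch.set idx 1)).length + 1 ≤ fuel →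
      pvLoopA nm fuel ansA idx ch
        = pvLoopB nm.length (pvA nm (ch.set idx 1))
            (ansA + pvVertB (nm.getD idx 'A')
              + ((pvA nm (ch.set idx 1)).map (fun i => pvVertB (nm.getD i 'A'))).sum)
            idx := by
  intro fuel
  induction fuel with
  | zero => intro ch idx ansA _ _ _ hf; omega
  | succ fuel ih =>
    intro ch idx ansA hlen hidx h0 hfuel
    have hidxc : idx < ch.length := by omega
    have hmem0 : (0 : Int) ∈ ch := by
      rw [List.getD_eq_getElem _ _ hidxc] at h0
      exact h0 ▸ List.getElem_mem hidxc
    have hlen' : (ch.set idx 1).length = nm.length := by rw [List.length_set]; exact hlen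
    have hcidx' : ¬ pvC nm (ch.set idx 1) idx := by
      intro hc
      have h1 : (ch.set idx 1).getD idx 0 = 1 := by
        rw [List.getD_eq_getElem _ _ (by rw [List.length_set]; exact hidxc)]
        simp
      have h2 := hc.2
      rw [h1] at h2
      exact absurd h2 (by norm_num)
    have hmem := mem_pvA nm (ch.set idx 1)
    have hsort := pairwise_pvA nm (ch.set idx 1)
    have hnodup := nodup_pvA nm (ch.set idx 1)
    rw [pvLoopA, if_pos hmem0]
    simp only [get_min_offset_and_index]
    by_cases ha0 : pvA nm (ch.set idx 1) = []
    · -- no target left anywhere: A breaks, B's loop is over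
      have hnone : ∀ i, i < nm.length → ¬ pvC nm (ch.set idx 1) i := by
        intro i hi hc
        have : i ∈ pvA nm (ch.set idx 1) := (hmem i).mpr ⟨hi, hc⟩
        rw [ha0] at this
        simp at this
      rw [scan_none nm _ _ 0 (by
        intro i hi
        rcases List.mem_append.mp hi with h | h <;> rw [List.mem_range'_1] at h <;>
          exact hnone i (by omega))]
      rw [scan_none nm _ _ 0 (by
        intro i hi
        rcases List.mem_append.mp hi with h | h <;>
          rw [List.mem_reverse] at h
        · rw [List.mem_range] at h; exact hnone i (by omega)
        · rw [List.mem_range'_1] at h; exact hnone i (by omega))]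
      rw [ha0, pvLoopB]
      norm_num [vert_eq]
    · obtain ⟨hR, hdf1, hfmem⟩ := scanR_char nm (ch.set idx 1) idx (pvA nm (ch.set idx 1))
        (pvBisectR (pvA nm (ch.set idx 1)) idx 0 (pvA nm (ch.set idx 1)).length)
        _ _ hmem hsort rfl rfl rfl hidx hcidx' ha0
      obtain ⟨hL, hdb1, hbmem⟩ := scanL_char nm (ch.set idx 1) idx (pvA nm (ch.set idx 1))
        (pvBisectR (pvA nm (ch.set idx 1)) idx 0 (pvA nm (ch.set idx 1)).length)
        _ _ hmem hsort rfl rfl rfl hidx hcidx' ha0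
      set a := pvA nm (ch.set idx 1) with hA
      set m := a.length with hm
      have hmpos : 0 < m := List.length_pos_iff.mpr ha0
      set pos := pvBisectR a idx 0 m with hposd
      set jf := pos % m with hjfd
      set jb := (PySem.Int.mod ((pos : Int) - 1) (m : Int)).toNat with hjbd
      set f := a.getD jf 0 with hfd
      set b := a.getD jb 0 with hbd
      set df := PySem.Int.mod ((f : Int) - (idx : Int)) (nm.length : Int) with hdfd
      set db := PySem.Int.mod ((idx : Int) - (b : Int)) (nm.length : Int) with hdbd
      rw [hR, hL]
      have hjflt : jf < m := Nat.mod_lt _ hmpos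
      have hjblt : jb < m := by
        have h1 : PySem.Int.mod ((pos : Int) - 1) (m : Int) < (m : Int) :=
          PySem.Int.mod_lt _ (by exact_mod_cast hmpos)
        have h2 : (0 : Int) ≤ PySem.Int.mod ((pos : Int) - 1) (m : Int) :=
          PySem.Int.mod_nonneg _ (by exact_mod_cast hmpos)
        omega
      have hnotneg : ¬ (min df db < 0) := by omega
      simp only [if_neg hnotneg]
      -- both loops recurse on the same chosen target
      have hstep : ∀ (ce : Nat) (jc : Nat) (d : Int), jc < m → ce = a.getD jc 0 →
          pvLoopA nm fuel (ansA + get_min_movement ((nm.getD idx 'A').toNat : Int) + d)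
              ce (ch.set idx 1)
            = pvLoopB nm.length (a.eraseIdx jc)
                ((ansA + pvVertB (nm.getD idx 'A')
                  + (a.map (fun i => pvVertB (nm.getD i 'A'))).sum) + d) ce := by
        intro ce jc d hjc hce
        have hcem : ce ∈ a := by
          rw [hce, List.getD_eq_getElem _ _ hjc]; exact List.getElem_mem hjc
        have hcen : ce < nm.length := ((hmem ce).mp hcem).1
        have hceC : pvC nm (ch.set idx 1) ce := ((hmem ce).mp hcem).2
        have herase : pvA nm ((ch.set idx 1).set ce 1) = a.eraseIdx jc := by
          rw [pvA_set nm (ch.set idx 1) hlen' ce hcen, ← hA, hce]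
          exact filter_ne_eq_eraseIdx a hnodup jc hjc
        have hfuel' : (pvA nm ((ch.set idx 1).set ce 1)).length + 1 ≤ fuel := by
          rw [herase, List.length_eraseIdx_of_lt hjc]
          omega
        rw [ih (ch.set idx 1) ce (ansA + get_min_movement ((nm.getD idx 'A').toNat : Int) + d)
          hlen' hcen hceC.2 hfuel']
        rw [herase]
        congr 1
        have hsum := sum_split_eraseIdx a hnodup (fun i => pvVertB (nm.getD i 'A')) jc hjc
        rw [← hce] at hsum
        have hsum' : (List.map (fun i => pvVertB (nm.getD i 'A')) a).sum
            = pvVertB (nm.getD ce 'A')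
              + (List.map (fun i => pvVertB (nm.getD i 'A')) (a.eraseIdx jc)).sum := by
          simpa using hsum
        rw [vert_eq]
        omega
      rcases le_or_gt df db with hc | hc
      · have hmin : min df db = df := min_eq_left hc
        rw [pvLoopB]
        rw [dif_neg (by omega : ¬ a.length = 0)]
        simp only [← hm, ← hposd, ← hjfd, ← hjbd, ← hfd, ← hbd, ← hdfd, ← hdbd]
        rw [if_pos hc, hmin, if_pos rfl]
        simp only [Int.toNat_natCast]
        exact hstep f jf df hjflt rfl
      · have hmin : min df db = db := by omega
        rw [pvLoopB]
        rw [dif_neg (by omega : ¬ a.length = 0)]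
        simp only [← hm, ← hposd, ← hjfd, ← hjbd, ← hfd, ← hbd, ← hdfd, ← hdbd]
        rw [if_neg (by omega : ¬ df ≤ db), hmin, if_neg (by omega : ¬ db = df)]
        simp only [Int.toNat_natCast]
        exact hstep b jb db hjblt rfl


theorem solution_main : ∀ (name : String), solution name = solution_alt name := by
  intro name
  simp only [solution, solution_alt]
  generalize name.toList = nm
  by_cases hn : nm.length = 0
  · rw [hn]
    simp [pvLoopA]
  · have hn' : 0 < nm.length := Nat.pos_of_ne_zero hn
    have hrep : (List.replicate nm.length (0 : Int)).getD 0 0 = 0 := by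
      rw [List.getD_eq_getElem _ _ (by simpa using hn')]
      simp
    have hfuel : (pvA nm ((List.replicate nm.length (0 : Int)).set 0 1)).length
        + 1 ≤ nm.length + 1 := by
      have := List.length_filter_le
        (fun i => decide (pvC nm ((List.replicate nm.length (0 : Int)).set 0 1) i))
        (List.range nm.length)
      simp only [pvA]
      simp only [List.length_range] at this ⊢
      omega
    rw [pv_main nm (nm.length + 1)
      (List.replicate nm.length 0) 0 0 (by simp) hn' hrep hfuel]
    have hpva : pvA nm ((List.replicate nm.length (0 : Int)).set 0 1)
        = (List.range' 1 (nm.length - 1)).filter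
            (fun i => decide (nm.getD i 'A' ≠ 'A')) := by
      unfold pvA
      have hr : List.range nm.length = 0 :: List.range' 1 (nm.length - 1) := by
        rw [List.range_eq_range']
        have : nm.length = (nm.length - 1) + 1 := by omega
        rw [this, List.range'_succ, ← this]
      rw [hr, List.filter_cons]
      have h00 : ((List.replicate nm.length (0 : Int)).set 0 1)[0]? = some 1 := by
        rw [List.getElem?_eq_getElem (by simpa using hn')]
        simp
      have hfalse : decide
          (pvC nm ((List.replicate nm.length (0 : Int)).set 0 1) 0) = false := by
        simp [pvC, List.getD, h00]
      rw [hfalse]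
      simp only [Bool.false_eq_true, if_false]
      apply List.filter_congr
      intro i hi
      rw [List.mem_range'_1] at hi
      have h1 : ((List.replicate nm.length (0 : Int)).set 0 1)[i]?
          = (List.replicate nm.length (0 : Int))[i]? :=
        List.getElem?_set_ne (by omega)
      have h2 : (List.replicate nm.length (0 : Int))[i]? = some 0 := by
        rw [List.getElem?_eq_getElem (by simpa using (by omega : i < nm.length))]
        simp
      simp [pvC, List.getD, h1, h2]
    rw [hpva]
    simp only [if_neg hn]
    congr 1
    omega


-- A's forward scan finds exactly B's bisect-selected forward-nearest target, at B's modular distance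
-- ===== VERDICT (by name: the statement is the Claim_ definition above) =====
theorem solution_spec : Claim_equal_solution := by
  intro name _
  unfold Spec_solution
  exact solution_main name
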